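-- pv_equiv track=rewrite | github.com/rightthumb/rightthumb-widgets-v0 | widgets/python/unhackable2.py | scrampleIDs
-- ===== SOURCE A (Python) =====
-- def scrampleIDs(ids):
-- 	if len(ids) > 36:
-- 		result = ''
--
-- 		i=0
-- 		for char in ids:
-- 			if i == 1:
-- 				result += ids[36]
-- 			elif i == 2:
-- 				result += ids[35]
-- 			elif i == 8:
-- 				result += ids[20]
-- 			elif i == 36:
-- 				result += ids[1]
-- 			elif i == 35:
-- 				result += ids[2]
-- 			elif i == 20:
-- 				result += ids[8]
-- 			elif i == 10:
-- 				result += ids[15]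
-- 			elif i == 11:
-- 				result += ids[16]
-- 			elif i == 12:
-- 				result += ids[17]
-- 			elif i == 13:
-- 				result += ids[18]
-- 			elif i == 15:
-- 				result += ids[10]
-- 			elif i == 16:
-- 				result += ids[11]
-- 			elif i == 17:
-- 				result += ids[12]
-- 			elif i == 18:
-- 				result += ids[13]
-- 			else:
-- 				result += char
-- 			i+=1
-- 	else:
-- 		result = ids
--
-- 	return result
-- ===== SOURCE B (Python) =====
-- _SWAPS = [(1, 36), (2, 35), (8, 20), (10, 15), (11, 16), (12, 17), (13, 18)]
--
-- def scrampleIDs(ids):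
-- 	if len(ids) > 36:
-- 		chars = list(ids)
-- 		for a, b in _SWAPS:
-- 			chars[a], chars[b] = chars[b], chars[a]
-- 		return ''.join(chars)
-- 	else:
-- 		return ids
-- ===== Notes on version B (the rewrite author's own statement) =====
-- stated objective: simpler
-- what changed: Replaces the per-character scan with a 15-way index dispatch chain by a loop over an explicit table of 7 index pairs, swapping the two characters of each pair in a list and joining it.
import Mathlib
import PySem

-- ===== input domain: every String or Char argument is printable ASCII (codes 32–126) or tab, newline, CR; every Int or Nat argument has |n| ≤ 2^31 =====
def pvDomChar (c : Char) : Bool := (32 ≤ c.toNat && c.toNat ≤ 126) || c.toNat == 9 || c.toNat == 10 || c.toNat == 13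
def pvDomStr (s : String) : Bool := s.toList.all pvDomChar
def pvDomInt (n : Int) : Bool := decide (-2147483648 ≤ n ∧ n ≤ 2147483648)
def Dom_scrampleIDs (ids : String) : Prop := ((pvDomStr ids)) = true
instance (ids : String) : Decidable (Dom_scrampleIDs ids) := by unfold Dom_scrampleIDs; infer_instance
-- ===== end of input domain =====

-- B swaps the seven fixed index pairs in a char list instead of A's per-character
-- scan with a 15-way index dispatch; objective: simpler.

-- ===== PORT A =====
-- B swaps the seven fixed index pairs in a char list instead of A's per-character
-- scan with a 15-way index dispatch; objective: simpler.

-- the body of A's for-loop: from the source chars, the counter i and the current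
-- character, the character appended to result (the 15-way dispatch)
def scrampleStep (cs : List Char) (i : Nat) (ch : Char) : Char :=
  if i = 1 then PySem.List.pyGetD cs 36 ch
  else if i = 2 then PySem.List.pyGetD cs 35 ch
  else if i = 8 then PySem.List.pyGetD cs 20 ch
  else if i = 36 then PySem.List.pyGetD cs 1 ch
  else if i = 35 then PySem.List.pyGetD cs 2 ch
  else if i = 20 then PySem.List.pyGetD cs 8 ch
  else if i = 10 then PySem.List.pyGetD cs 15 ch
  else if i = 11 then PySem.List.pyGetD cs 16 ch
  else if i = 12 then PySem.List.pyGetD cs 17 ch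
  else if i = 13 then PySem.List.pyGetD cs 18 ch
  else if i = 15 then PySem.List.pyGetD cs 10 ch
  else if i = 16 then PySem.List.pyGetD cs 11 ch
  else if i = 17 then PySem.List.pyGetD cs 12 ch
  else if i = 18 then PySem.List.pyGetD cs 13 ch
  else ch

def scrampleIDs (ids : String) : String :=
  if ids.toList.length > 36 then
    String.ofList ((ids.toList.foldl (fun (acc : List Char × Nat) ch =>
      (acc.1 ++ [scrampleStep ids.toList acc.2 ch], acc.2 + 1)) (([] : List Char), 0)).1)
  else ids

-- ===== PORT B =====
def scrampleSwaps : List (Nat × Nat) :=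
  [(1, 36), (2, 35), (8, 20), (10, 15), (11, 16), (12, 17), (13, 18)]

-- the body of B's loop: swap the characters at positions p.1 and p.2
def swapAt (l : List Char) (p : Nat × Nat) : List Char :=
  let x := l.getD p.1 ' '
  let y := l.getD p.2 ' '
  (l.set p.1 y).set p.2 x

def scrampleIDs_alt (ids : String) : String :=
  if ids.toList.length > 36 then String.ofList (scrampleSwaps.foldl swapAt ids.toList)
  else ids

-- ===== PRECONDITION & SPEC =====
def Spec_scrampleIDs (ids : String) (out : String) : Prop := out = scrampleIDs_alt ids
instance (ids : String) (out : String) : Decidable (Spec_scrampleIDs ids out) := by unfold Spec_scrampleIDs; infer_instance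

-- ===== CLAIM (what is proved, stated in full; the proofs are below) =====
def Claim_equal_scrampleIDs : Prop := ∀ (ids : String), Dom_scrampleIDs ids → Spec_scrampleIDs ids (scrampleIDs ids)

-- ===== LEMMAS AND PROOFS =====

-- A's fold appends, per character, scrampleStep of its index: result = indexed map
theorem scrampleIDs_foldA (cs : List Char) :
    ∀ (xs : List Char) (acc : List Char) (i : Nat),
      (xs.foldl (fun (acc : List Char × Nat) ch =>
        (acc.1 ++ [scrampleStep cs acc.2 ch], acc.2 + 1)) (acc, i)).1
      = acc ++ (xs.zipIdx i).map (fun p => scrampleStep cs p.2 p.1) := by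
  intro xs
  induction xs with
  | nil => simp
  | cons x xs ih => intro acc i; simp [List.foldl_cons, ih]

theorem length_swapAt (l : List Char) (p : Nat × Nat) : (swapAt l p).length = l.length := by
  simp [swapAt]

theorem getElem_swapAt (l : List Char) (p : Nat × Nat) (k : Nat) (hk : k < (swapAt l p).length) :
    (swapAt l p)[k] = if k = p.2 then l.getD p.1 ' ' else if k = p.1 then l.getD p.2 ' '
      else l.getD k ' ' := by
  have hk' : k < l.length := by simpa [swapAt] using hk
  simp only [swapAt, List.getElem_set]
  by_cases h2 : p.2 = k
  · simp [h2]
  · by_cases h1 : p.1 = k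
    · simp [h1, h2, Ne.symm h2]
    · simp [Ne.symm h1, Ne.symm h2, h1, h2, List.getElem?_eq_getElem hk']

theorem getD_swapAt (l : List Char) (p : Nat × Nat) (hp1 : p.1 < l.length)
    (hp2 : p.2 < l.length) (k : Nat) :
    (swapAt l p).getD k ' ' = if k = p.2 then l.getD p.1 ' ' else if k = p.1 then l.getD p.2 ' '
      else l.getD k ' ' := by
  by_cases hk : k < l.length
  · rw [List.getD_eq_getElem _ _ (by simpa [swapAt] using hk), getElem_swapAt]
  · have h2 : ¬ k = p.2 := by omega
    have h1 : ¬ k = p.1 := by omega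
    have hnone : l[k]? = none := List.getElem?_eq_none (by omega)
    simp [swapAt, List.getD_eq_getElem?_getD, h1, h2, Ne.symm h1,
      Ne.symm h2, hnone]

set_option maxHeartbeats 1000000 in
theorem key (cs : List Char) (hlen : 36 < cs.length) :
    (cs.zipIdx 0).map (fun p => scrampleStep cs p.2 p.1)
    = scrampleSwaps.foldl swapAt cs := by
  simp only [scrampleSwaps, List.foldl_cons, List.foldl_nil]
  apply List.ext_getElem
  · simp [length_swapAt]
  · intro k hk1 hk2
    have hk : k < cs.length := by simpa using hk1
    have b1 : 1 < cs.length := by omega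
    have b2 : 2 < cs.length := by omega
    have b8 : 8 < cs.length := by omega
    have b10 : 10 < cs.length := by omega
    have b11 : 11 < cs.length := by omega
    have b12 : 12 < cs.length := by omega
    have b13 : 13 < cs.length := by omega
    have b15 : 15 < cs.length := by omega
    have b16 : 16 < cs.length := by omega
    have b17 : 17 < cs.length := by omega
    have b18 : 18 < cs.length := by omega
    have b20 : 20 < cs.length := by omega
    have b35 : 35 < cs.length := by omega
    have b36 : 36 < cs.length := by omega
    simp only [List.getElem_map, List.getElem_zipIdx, Nat.zero_add]
    simp only [scrampleStep, PySem.List.pyGetD_ofNat']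
    simp only [getElem_swapAt, getD_swapAt, length_swapAt, b1, b2, b8, b10, b11, b12,
      b15, b16, b17, b20, b35, b36, Nat.reduceEqDiff, reduceIte]
    have g : ∀ (j : Nat) (hj : j < cs.length) (d : Char), cs.getD j d = cs[j] :=
      fun j hj d => List.getD_eq_getElem cs d hj
    simp only [g 36 b36, g 35 b35, g 20 b20, g 1 b1, g 2 b2, g 8 b8, g 15 b15,
      g 16 b16, g 17 b17, g 18 b18, g 10 b10, g 11 b11, g 12 b12, g 13 b13, g k hk]
    by_cases e1 : k = 1
    · subst e1; simp
    by_cases e2 : k = 2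
    · subst e2; simp
    by_cases e8 : k = 8
    · subst e8; simp
    by_cases e36 : k = 36
    · subst e36; simp
    by_cases e35 : k = 35
    · subst e35; simp
    by_cases e20 : k = 20
    · subst e20; simp
    by_cases e10 : k = 10
    · subst e10; simp
    by_cases e11 : k = 11
    · subst e11; simp
    by_cases e12 : k = 12
    · subst e12; simp
    by_cases e13 : k = 13
    · subst e13; simp
    by_cases e15 : k = 15
    · subst e15; simp
    by_cases e16 : k = 16
    · subst e16; simp
    by_cases e17 : k = 17
    · subst e17; simp
    by_cases e18 : k = 18
    · subst e18; simp
    simp [e1, e2, e8, e36, e35, e20, e10, e11, e12, e13, e15, e16, e17, e18]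

set_option maxHeartbeats 1000000 in
theorem scrampleIDs_eq (ids : String) : scrampleIDs ids = scrampleIDs_alt ids := by
  unfold scrampleIDs scrampleIDs_alt
  by_cases h : ids.toList.length > 36
  · rw [if_pos h, if_pos h]
    congr 1
    rw [scrampleIDs_foldA ids.toList ids.toList [] 0, List.nil_append]
    exact key ids.toList h
  · rw [if_neg h, if_neg h]

-- ===== VERDICT (by name: the statement is the Claim_ definition above) =====
theorem scrampleIDs_spec : Claim_equal_scrampleIDs := by
  intro ids _
  exact scrampleIDs_eq ids
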